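-- pv_equiv track=rewrite | github.com/santax666/santax666.github.io | kasper_optimize.py | insert_minus_before_bkt
-- ===== SOURCE A (Python) =====
-- import itertools
--
-- def insert_minus_before_bkt(math_str):
--     new_list = []
--     for sim_ind, simbol in enumerate(math_str):
--         if simbol != '(':
--             for item in itertools.product(('','-'), repeat=sim_ind):
--                 temp_str = ''.join([str(a) + b for a,b in zip(item,'('*sim_ind)])
--                 new_str = math_str.replace('('*sim_ind, temp_str, 1)
--                 new_list.append(new_str)
--             break
--     for variants in new_list:
--         yield variants
-- ===== SOURCE B (Python) =====
-- def insert_minus_before_bkt(math_str):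
--     if not math_str:
--         return
--     if math_str[0] != '(':
--         yield math_str
--         return
--     sub = list(insert_minus_before_bkt(math_str[1:]))
--     for v in sub:
--         yield '(' + v
--     for v in sub:
--         yield '-(' + v
-- ===== Notes on version B (the rewrite author's own statement) =====
-- stated objective: alternative
-- what changed: Replaces the enumerate/itertools.product/str.replace pipeline by a structural recursion on the string: peel one leading open paren at a time, recursively compute the variants of the tail, and emit each tail variant prefixed plainly and then prefixed with a minus; no explicit 2^k index enumeration, no product tuples, no replace.
import Mathlib
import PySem

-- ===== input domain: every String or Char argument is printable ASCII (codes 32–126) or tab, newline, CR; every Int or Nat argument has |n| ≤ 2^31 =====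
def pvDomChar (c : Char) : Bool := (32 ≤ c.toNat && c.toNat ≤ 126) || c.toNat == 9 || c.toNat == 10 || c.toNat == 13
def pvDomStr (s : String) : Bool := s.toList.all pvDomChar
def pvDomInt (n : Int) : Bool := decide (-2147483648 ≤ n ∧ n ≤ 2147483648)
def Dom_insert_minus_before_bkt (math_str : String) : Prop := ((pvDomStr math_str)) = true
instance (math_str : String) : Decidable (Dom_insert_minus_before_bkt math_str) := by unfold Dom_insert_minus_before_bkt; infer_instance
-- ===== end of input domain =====

-- B replaces A's enumerate + itertools.product + str.replace pipeline by a structural recursion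
-- that peels leading '(' chars and prefixes the tail's variants (objective: alternative decomposition).


-- ===== PORT A =====
-- itertools.product(('','-'), repeat=k), in product's order (last coordinate varies fastest)
def pvProdRep : Nat → List (List String)
  | 0 => [[]]
  | n + 1 => (["", "-"] : List String).flatMap (fun a => (pvProdRep n).map (fun rest => a :: rest))

-- s.replace(old, new, 1): replace the FIRST occurrence only (exact, incl. old = '' inserting at front)
def pvReplFirst (old new : List Char) : List Char → List Char
  | [] => if old.isPrefixOf [] then new ++ ([] : List Char).drop old.length else []
  | c :: rest =>
    if old.isPrefixOf (c :: rest) then new ++ (c :: rest).drop old.length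
    else c :: pvReplFirst old new rest

-- the "for sim_ind, simbol in enumerate(...): if simbol != '(': ... break" scan
def pvFindBreak : List Char → Nat → Option Nat
  | [], _ => none
  | c :: rest, i => if c ≠ '(' then some i else pvFindBreak rest (i + 1)

def insert_minus_before_bkt (math_str : String) : List String :=
  match pvFindBreak math_str.toList 0 with
  | none => []
  | some k =>
    (pvProdRep k).map (fun item =>
      let temp_str := PySem.Str.join "" (item.map (fun a => a ++ "("))
      String.ofList (pvReplFirst (List.replicate k '(') temp_str.toList math_str.toList))

-- ===== PORT B =====
-- the recursive generator of Source B, over the string's character list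
def pvGo : List Char → List String
  | [] => []
  | c :: rest =>
    if c ≠ '(' then [String.ofList (c :: rest)]
    else
      let sub := pvGo rest
      sub.map (fun v => "(" ++ v) ++ sub.map (fun v => "-(" ++ v)

def insert_minus_before_bkt_alt (math_str : String) : List String :=
  pvGo math_str.toList

-- ===== PRECONDITION & SPEC =====
def Spec_insert_minus_before_bkt (math_str : String) (out : List String) : Prop := out = insert_minus_before_bkt_alt math_str
instance (math_str : String) (out : List String) : Decidable (Spec_insert_minus_before_bkt math_str out) := by unfold Spec_insert_minus_before_bkt; infer_instance

-- ===== CLAIM (what is proved, stated in full; the proofs are below) =====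
def Claim_equal_insert_minus_before_bkt : Prop := ∀ (math_str : String), Dom_insert_minus_before_bkt math_str → Spec_insert_minus_before_bkt math_str (insert_minus_before_bkt math_str)

-- ===== LEMMAS AND PROOFS =====

-- pvLeadParens: length of the leading run of '(' (proof-side helper only)
def pvLeadParens : List Char → Nat
  | [] => 0
  | c :: rest => if c = '(' then pvLeadParens rest + 1 else 0

-- pvLeadParens decomposes the string: a replicate-k prefix of '(' followed by a rest not starting with '('
theorem pvLead_spec (cs : List Char) :
    List.replicate (pvLeadParens cs) '(' ++ cs.drop (pvLeadParens cs) = cs ∧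
    (∀ c t, cs.drop (pvLeadParens cs) = c :: t → c ≠ '(') := by
  induction cs with
  | nil => simp [pvLeadParens]
  | cons c rest ih =>
    by_cases hc : c = '('
    · subst hc
      have hL : pvLeadParens ('(' :: rest) = pvLeadParens rest + 1 := by simp [pvLeadParens]
      rw [hL]
      refine ⟨?_, ?_⟩
      · simp only [List.replicate_succ, List.cons_append, List.drop_succ_cons]
        rw [ih.1]
      · intro c' t h
        simp only [List.drop_succ_cons] at h
        exact ih.2 c' t h
    · have hL : pvLeadParens (c :: rest) = 0 := by simp [pvLeadParens, hc]
      rw [hL]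
      refine ⟨by simp, ?_⟩
      intro c' t h
      simp only [List.drop_zero, List.cons_eq_cons] at h
      rw [← h.1]
      exact hc

theorem pvFindBreak_none (k i : Nat) : pvFindBreak (List.replicate k '(') i = none := by
  induction k generalizing i with
  | zero => simp [pvFindBreak]
  | succ k ih => simp [List.replicate_succ, pvFindBreak, ih]

theorem pvFindBreak_some (k i : Nat) (c : Char) (t : List Char) (hc : c ≠ '(') :
    pvFindBreak (List.replicate k '(' ++ c :: t) i = some (i + k) := by
  induction k generalizing i with
  | zero => simp [pvFindBreak, hc]
  | succ k ih =>
    simp only [List.replicate_succ, List.cons_append, pvFindBreak]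
    rw [if_neg (by simp), ih (i + 1)]
    congr 1
    omega

theorem pvGo_all_parens (k : Nat) : pvGo (List.replicate k '(') = [] := by
  induction k with
  | zero => simp [pvGo]
  | succ k ih => simp [List.replicate_succ, pvGo, ih]

theorem pvReplFirst_of_prefix (old new s : List Char) (hp : old.isPrefixOf s = true) :
    pvReplFirst old new s = new ++ s.drop old.length := by
  cases s with
  | nil => simp [pvReplFirst, hp]
  | cons c rest => simp [pvReplFirst, hp]

theorem pvReplFirst_prefix (k : Nat) (new t : List Char) :
    pvReplFirst (List.replicate k '(') new (List.replicate k '(' ++ t) = new ++ t := by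
  rw [pvReplFirst_of_prefix _ _ _ (by rw [List.isPrefixOf_iff_prefix]; exact List.prefix_append _ _)]
  rw [List.drop_left' (by simp)]

theorem pvJoin_empty_cons (x : String) (xs : List String) :
    PySem.Str.join "" (x :: xs) = x ++ PySem.Str.join "" xs := by
  unfold PySem.Str.join
  cases xs with
  | nil => simp [PySem.Chars.join, List.intercalate, String.ofList_toList]
  | cons y ys =>
    simp only [List.map_cons]
    rw [show ("" : String).toList = ([] : List Char) from rfl, PySem.Chars.join_cons_cons]
    simp [String.ofList_append, String.ofList_toList]

-- the key bridge: the recursion pvGo, on a run of k '(' followed by c≠'(', produces exactly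
-- the product-ordered list A builds
theorem pvGo_run (k : Nat) (c : Char) (t : List Char) (hc : c ≠ '(') :
    pvGo (List.replicate k '(' ++ c :: t) =
      (pvProdRep k).map (fun item =>
        PySem.Str.join "" (item.map (fun a => a ++ "(")) ++ String.ofList (c :: t)) := by
  induction k with
  | zero =>
    simp only [List.replicate_zero, List.nil_append, pvGo, if_pos hc, pvProdRep,
      List.map_cons, List.map_nil]
    have h0 : PySem.Str.join "" ([] : List String) = "" := by decide
    rw [h0, String.empty_append]
  | succ k ih =>
    have hstep : pvGo (List.replicate (k + 1) '(' ++ c :: t) =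
        (pvGo (List.replicate k '(' ++ c :: t)).map (fun v => "(" ++ v) ++
        (pvGo (List.replicate k '(' ++ c :: t)).map (fun v => "-(" ++ v) := by
      simp [List.replicate_succ, pvGo]
    rw [hstep, ih]
    have hprod : pvProdRep (k + 1) =
        (pvProdRep k).map (fun rest => ("" : String) :: rest) ++
        (pvProdRep k).map (fun rest => ("-" : String) :: rest) := by
      simp [pvProdRep]
    rw [hprod]
    simp only [List.map_append, List.map_map]
    congr 1 <;>
    · apply List.map_congr_left
      intro item _
      simp only [Function.comp_apply, List.map_cons]
      rw [pvJoin_empty_cons, String.append_assoc]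
      congr 2

-- ===== VERDICT (by name: the statement is the Claim_ definition above) =====
theorem insert_minus_before_bkt_spec : Claim_equal_insert_minus_before_bkt := by
  unfold Claim_equal_insert_minus_before_bkt Spec_insert_minus_before_bkt
  intro s _
  obtain ⟨hdec, hhead⟩ := pvLead_spec s.toList
  rcases hdrop : s.toList.drop (pvLeadParens s.toList) with _ | ⟨c, t⟩
  · -- empty or entirely '(' : both ports return []
    rw [hdrop, List.append_nil] at hdec
    have hfb : pvFindBreak s.toList 0 = none := by
      rw [← hdec]; exact pvFindBreak_none _ 0
    have hgo : pvGo s.toList = [] := by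
      rw [← hdec]; exact pvGo_all_parens _
    simp only [insert_minus_before_bkt, insert_minus_before_bkt_alt, hfb, hgo]
  · -- a leading run of k '(' followed by c ≠ '('
    have hc : c ≠ '(' := hhead c t hdrop
    rw [hdrop] at hdec
    generalize hK : pvLeadParens s.toList = K at hdec
    have hfb : pvFindBreak s.toList 0 = some K := by
      rw [← hdec]
      simpa using pvFindBreak_some K 0 c t hc
    simp only [insert_minus_before_bkt, insert_minus_before_bkt_alt, hfb]
    conv_rhs => rw [← hdec]
    rw [pvGo_run K c t hc]
    apply List.map_congr_left
    intro item _
    conv_lhs => rw [← hdec]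
    rw [pvReplFirst_prefix]
    rw [String.ofList_append, String.ofList_toList]
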